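-- pv_equiv track=rewrite | github.com/jbsam2/algo_problem | kakao/2020/kakao2020_6.py | solution
-- ===== SOURCE A (Python) =====
-- def solution(n,weak,dist):
--     dist.sort(reverse=True);q=[weak];v=set();v.add(tuple(weak))
--     for i,d in enumerate(dist):
--         for _ in range(len(q)):
--             cur=q.pop(0)
--             for p in cur:
--                 s=p;f=(p+d)%n;tmp=tuple(filter(lambda x:x<s or x>f,cur)if s<f else filter(lambda x:x<s and x>f,cur))
--                 if len(tmp)==0:return i+1
--                 elif tmp not in v:v.add(tmp);q.append(list(tmp))
--     return -1
-- ===== SOURCE B (Python) =====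
-- # B: restructures A's queue-driven search as a pure recursion over the sorted distances with
-- # staged per-level passes (a short-circuit all-covered test over a generator, then the
-- # child list, a dict.fromkeys dedup and one set union), keeping no mutable queue or growing
-- # visited set; like A it sorts `dist` in place, and the equivalence is about the return value.
-- def solution(n, weak, dist):
--     dist.sort(reverse=True)
--
--     def arc(state, p, d):
--         f = (p + d) % n
--         keep = (lambda x: x < p or x > f) if p < f else (lambda x: f < x < p)
--         return tuple(filter(keep, state))
--
--     def gone(state, p, d):
--         f = (p + d) % n
--         if p < f:
--             return p <= min(state) and max(state) <= f
--         return all(x <= f or x >= p for x in state)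
--
--     def expand(i, frontier, seen):
--         if i == len(dist) or not frontier:
--             return -1
--         d = dist[i]
--         if any(gone(s, p, d) for s in frontier for p in s):
--             return i + 1
--         children = [arc(s, p, d) for s in frontier for p in s]
--         fresh = [c for c in dict.fromkeys(children) if c not in seen]
--         return expand(i + 1, fresh, seen | set(children))
--
--     start = tuple(weak)
--     return expand(0, [start], frozenset([start]))
-- ===== Notes on version B (the rewrite author's own statement) =====
-- stated objective: alternative
-- what changed: B replaces A's single mutable FIFO queue (pop(0)/append under a range(len(q)) counter with interleaved early-return, dedup and visited-set mutation) by a pure recursion over the sorted distances whose body is staged passes: a short-circuit all-covered test (min/max fast path) over a generator, then the child list, a dict.fromkeys dedup and one frozenset union; like A it sorts the dist argument in place.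
import Mathlib
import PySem

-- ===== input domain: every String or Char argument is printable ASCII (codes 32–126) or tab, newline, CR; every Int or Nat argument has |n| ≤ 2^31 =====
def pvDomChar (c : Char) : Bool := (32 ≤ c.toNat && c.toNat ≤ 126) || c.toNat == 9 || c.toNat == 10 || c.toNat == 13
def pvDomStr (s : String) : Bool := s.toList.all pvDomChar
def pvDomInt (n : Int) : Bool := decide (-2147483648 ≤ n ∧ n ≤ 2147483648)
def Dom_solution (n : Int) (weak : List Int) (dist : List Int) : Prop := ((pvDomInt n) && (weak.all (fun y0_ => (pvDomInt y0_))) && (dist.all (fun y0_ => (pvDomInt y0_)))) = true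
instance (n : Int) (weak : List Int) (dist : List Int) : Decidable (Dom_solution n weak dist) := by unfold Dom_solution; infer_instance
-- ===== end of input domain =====

-- B restructures A's queue-driven search (mutable FIFO with interleaved early-return, dedup and
-- visited-set mutation) as a pure recursion over the sorted distances with staged per-level passes:
-- a short-circuit emptiness test over the arcs, then the child list, a dict.fromkeys dedup, one set union.
-- Both Pythons sort the `dist` argument in place; the equivalence is about the return value only.

-- ===== PORT A =====
-- s=p; f=(p+d)%n; tmp = tuple(filter(... , cur) if s<f else filter(... , cur))
def pvCoverA (n d p : Int) (cur : List Int) : List Int :=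
  let f := PySem.Int.mod (p + d) n
  if p < f then cur.filter (fun x => decide (x < p) || decide (x > f))
  else cur.filter (fun x => decide (x < p) && decide (x > f))

-- the `for p in cur` loop: early `return` = none; otherwise the updated (v, q)
def pvPointsA (n d : Int) (cur : List Int) :
    List Int → PySem.Set (List Int) → List (List Int) →
      Option (PySem.Set (List Int) × List (List Int))
  | [], v, q => some (v, q)
  | p :: ps, v, q =>
      let tmp := pvCoverA n d p cur
      if tmp.length = 0 then none
      else if PySem.Set.contains v tmp then pvPointsA n d cur ps v q
      else pvPointsA n d cur ps (PySem.Set.add v tmp) (q ++ [tmp])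

-- `for _ in range(len(q)): cur = q.pop(0); …` (the [] case is unreachable: the counter is len(q))
def pvLevelA (n d : Int) :
    Nat → List (List Int) → PySem.Set (List Int) →
      Option (PySem.Set (List Int) × List (List Int))
  | 0, q, v => some (v, q)
  | _ + 1, [], v => some (v, [])
  | m + 1, cur :: q, v =>
      match pvPointsA n d cur cur v q with
      | none => none
      | some (v', q') => pvLevelA n d m q' v'

-- `for i, d in enumerate(dist): …` with the early `return i+1`
def pvRoundsA (n : Int) : Nat → List Int → List (List Int) → PySem.Set (List Int) → Int
  | _, [], _, _ => -1
  | i, d :: ds, q, v =>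
      match pvLevelA n d q.length q v with
      | none => (i : Int) + 1
      | some (v', q') => pvRoundsA n (i + 1) ds q' v'

def solution (n : Int) (weak : List Int) (dist : List Int) : Int :=
  let ds := PySem.List.sorted dist (fun x => x) true
  pvRoundsA n 0 ds [weak] (PySem.Set.add PySem.Set.empty weak)

-- ===== PORT B =====
-- f=(p+d)%n; keep = (x<p or x>f) if p<f else (f<x<p)
def pvCoverB (n d p : Int) (cur : List Int) : List Int :=
  let f := PySem.Int.mod (p + d) n
  if p < f then cur.filter (fun x => decide (x < p) || decide (x > f))
  else cur.filter (fun x => decide (f < x) && decide (x < p))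

-- gone(state, p, d): the arc starting at p swallows the whole state (min/max fast path
-- when the arc does not wrap; state is nonempty at every call site, the empty fallback is true)
def pvGoneB (n d p : Int) (s : List Int) : Bool :=
  let f := PySem.Int.mod (p + d) n
  if p < f then
    match PySem.List.min? s (fun x => x), PySem.List.max? s (fun x => x) with
    | some mn, some mx => decide (p ≤ mn) && decide (mx ≤ f)
    | _, _ => true
  else s.all (fun x => decide (x ≤ f) || decide (p ≤ x))

-- expand(i, frontier, seen): recursion over the remaining distances, staged passes per level
def pvExpandB (n : Int) :
    List Int → Nat → List (List Int) → PySem.Set (List Int) → Int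
  | [], _, _, _ => -1
  | d :: ds, i, frontier, seen =>
      if frontier.isEmpty then -1
      else if frontier.any (fun s => s.any (fun p => pvGoneB n d p s)) then
        (i : Int) + 1
      else
        let children := frontier.flatMap (fun s => s.map (fun p => pvCoverB n d p s))
        pvExpandB n ds (i + 1)
            ((PySem.List.dedup children).filter (fun c => !PySem.Set.contains seen c))
            (PySem.Set.union seen (PySem.Set.ofList children))

def solution_alt (n : Int) (weak : List Int) (dist : List Int) : Int :=
  pvExpandB n (PySem.List.sorted dist (fun x => x) true) 0 [weak] (PySem.Set.ofList [weak])

-- ===== PRECONDITION & SPEC =====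
-- Pre_ excludes exactly the inputs where Python A raises ZeroDivisionError: n = 0 is reached
-- by `(p+d)%n` iff both weak and dist are nonempty.
def Pre_solution (n : Int) (weak : List Int) (dist : List Int) : Prop :=
  n ≠ 0 ∨ weak = [] ∨ dist = []
instance (n : Int) (weak : List Int) (dist : List Int) : Decidable (Pre_solution n weak dist) := by
  unfold Pre_solution; infer_instance

def pvWitness_solution : Int × List Int × List Int := (12, ([1, 5, 6, 10], [1, 2, 3]))

def Spec_solution (n : Int) (weak : List Int) (dist : List Int) (out : Int) : Prop :=
  out = solution_alt n weak dist
instance (n : Int) (weak : List Int) (dist : List Int) (out : Int) :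
    Decidable (Spec_solution n weak dist out) := by unfold Spec_solution; infer_instance

-- ===== CLAIM (what is proved, stated in full; the proofs are below) =====
def Claim_equal_solution : Prop := ∀ (n : Int) (weak : List Int) (dist : List Int), Dom_solution n weak dist → Pre_solution n weak dist → Spec_solution n weak dist (solution n weak dist)

-- ===== LEMMAS AND PROOFS =====

-- proof-side view of one interleaved dedup step of A
def pvStepB (acc : PySem.Set (List Int) × List (List Int)) (c : List Int) :
    PySem.Set (List Int) × List (List Int) :=
  if PySem.Set.contains acc.1 c then acc else (PySem.Set.add acc.1 c, acc.2 ++ [c])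

-- A's arc filter equals B's (the two conjuncts are written in the other order)
theorem pvCover_eq (n d p : Int) (cur : List Int) : pvCoverA n d p cur = pvCoverB n d p cur := by
  by_cases h : p < PySem.Int.mod (p + d) n
  · simp [pvCoverA, pvCoverB, h]
  · simp only [pvCoverA, pvCoverB, if_neg h]
    exact List.filter_congr (fun x _ => by simp [gt_iff_lt, Bool.and_comm])

-- A's point loop = "any child empty, else fold the dedup step over all children"
theorem pvPointsA_spec (n d : Int) (cur : List Int) :
    ∀ (rem : List Int) (v : PySem.Set (List Int)) (q : List (List Int)),
      pvPointsA n d cur rem v q =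
        (if (rem.map (fun p => pvCoverA n d p cur)).any (fun c => c.isEmpty) then none
         else some ((rem.map (fun p => pvCoverA n d p cur)).foldl pvStepB (v, q))) := by
  intro rem
  induction rem with
  | nil => intro v q; simp [pvPointsA]
  | cons p ps ih =>
      intro v q
      by_cases h0 : (pvCoverA n d p cur).length = 0
      · simp [pvPointsA, List.length_eq_zero_iff.mp h0]
      · have hne : (pvCoverA n d p cur).isEmpty = false := by
          rw [List.isEmpty_eq_false_iff_exists_mem]
          rcases List.exists_mem_of_length_pos (Nat.pos_of_ne_zero h0) with ⟨x, hx⟩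
          exact ⟨x, hx⟩
        by_cases hc : pvCoverA n d p cur ∈ v
        · simp [pvPointsA, h0, hc, ih, hne, pvStepB]
        · simp [pvPointsA, h0, hc, ih, hne, pvStepB]

-- filtering away `seen` elements ignores a discard of an already-seen element
theorem pvFilter_discard (s : List (List Int)) (c : List Int) (v : PySem.Set (List Int))
    (hc : c ∈ v) :
    (PySem.Set.discard s c).filter (fun y => !PySem.Set.contains v y) =
      s.filter (fun y => !PySem.Set.contains v y) := by
  show (s.filter (fun y => !(y == c))).filter (fun y => !PySem.Set.contains v y) = _
  rw [List.filter_filter]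
  refine List.filter_congr ?_
  intro y _
  by_cases hy : y = c
  · subst hy; simp [hc]
  · simp [hy]

-- filtering by "not in add v c" = discard c, then filter by "not in v"
theorem pvFilter_add (s : List (List Int)) (c : List Int) (v : PySem.Set (List Int)) :
    s.filter (fun y => !PySem.Set.contains (PySem.Set.add v c) y) =
      (PySem.Set.discard s c).filter (fun y => !PySem.Set.contains v y) := by
  show _ = (s.filter (fun y => !(y == c))).filter (fun y => !PySem.Set.contains v y)
  rw [List.filter_filter]
  refine List.filter_congr ?_
  intro y _
  by_cases hy : y = c
  · subst hy; simp [PySem.Set.mem_add]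
  · simp [PySem.Set.mem_add, hy]

-- A's interleaved dedup fold, staged: the new seen set and the fresh children
theorem pvFoldl_pvStepB_spec :
    ∀ (cs : List (List Int)) (v : PySem.Set (List Int)) (q : List (List Int)),
      cs.foldl pvStepB (v, q) =
        (PySem.Set.update v cs,
         q ++ (PySem.List.dedup cs).filter (fun c => !PySem.Set.contains v c)) := by
  intro cs
  induction cs with
  | nil => intro v q; simp [PySem.Set.update]
  | cons c cs ih =>
      intro v q
      by_cases hc : c ∈ v
      · have h1 : pvStepB (v, q) c = (v, q) := by simp [pvStepB, hc]
        rw [List.foldl_cons, h1, ih, PySem.Set.update_cons, PySem.Set.add_of_mem hc,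
            PySem.List.dedup_eq_ofList, PySem.List.dedup_eq_ofList, PySem.Set.ofList_cons]
        have h2 : List.filter (fun y => !PySem.Set.contains v y)
            (c :: (PySem.Set.ofList cs).discard c) =
            List.filter (fun y => !PySem.Set.contains v y) ((PySem.Set.ofList cs).discard c) := by
          simp [hc]
        rw [h2, pvFilter_discard (PySem.Set.ofList cs) c v hc]
      · have h1 : pvStepB (v, q) c = (PySem.Set.add v c, q ++ [c]) := by simp [pvStepB, hc]
        rw [List.foldl_cons, h1, ih, PySem.Set.update_cons,
            PySem.List.dedup_eq_ofList, PySem.List.dedup_eq_ofList, PySem.Set.ofList_cons,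
            pvFilter_add (PySem.Set.ofList cs) c v]
        simp [hc, List.append_assoc]

-- seen | set(children) is the same set value as folding the children into seen
theorem pvUnion_ofList (v : PySem.Set (List Int)) (cs : List (List Int)) :
    PySem.Set.union v (PySem.Set.ofList cs) = PySem.Set.update v cs := by
  show PySem.Set.update v (PySem.Set.ofList cs) = PySem.Set.update v cs
  rw [PySem.Set.update_eq_append_filter, PySem.Set.update_eq_append_filter,
      PySem.Set.ofList_ofList]

-- the dedup fold only appends to the list component
theorem pvStepB_foldl_append :
    ∀ (cs : List (List Int)) (v : PySem.Set (List Int)) (a b : List (List Int)),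
      cs.foldl pvStepB (v, a ++ b) =
        ((cs.foldl pvStepB (v, b)).1, a ++ (cs.foldl pvStepB (v, b)).2) := by
  intro cs
  induction cs with
  | nil => intro v a b; rfl
  | cons c cs ih =>
      intro v a b
      by_cases hc : c ∈ v
      · simp [List.foldl_cons, pvStepB, hc, ih]
      · simpa [List.foldl_cons, pvStepB, hc, List.append_assoc]
          using ih (PySem.Set.add v c) a (b ++ [c])

theorem pvStepB_foldl_nil (cs : List (List Int)) (v : PySem.Set (List Int))
    (q : List (List Int)) :
    cs.foldl pvStepB (v, q) = ((cs.foldl pvStepB (v, [])).1, q ++ (cs.foldl pvStepB (v, [])).2) := by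
  simpa using pvStepB_foldl_append cs v q []

-- A's level loop (queue with counter) = whole-level children + any() + dedup fold
theorem pvLevelA_spec (n d : Int) :
    ∀ (L R : List (List Int)) (v : PySem.Set (List Int)),
      pvLevelA n d L.length (L ++ R) v =
        (if (L.flatMap (fun cur => cur.map (fun p => pvCoverA n d p cur))).any
              (fun c => c.isEmpty) then none
         else
           some (((L.flatMap (fun cur => cur.map (fun p => pvCoverA n d p cur))).foldl
                    pvStepB (v, [])).1,
                 R ++ ((L.flatMap (fun cur => cur.map (fun p => pvCoverA n d p cur))).foldl
                    pvStepB (v, [])).2)) := by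
  intro L
  induction L with
  | nil => intro R v; simp [pvLevelA]
  | cons cur L ih =>
      intro R v
      have hlen : (cur :: L).length = L.length + 1 := rfl
      rw [hlen]
      show pvLevelA n d (L.length + 1) (cur :: (L ++ R)) v = _
      rw [pvLevelA, pvPointsA_spec]
      by_cases he : (cur.map (fun p => pvCoverA n d p cur)).any (fun c => c.isEmpty) = true
      · simp [he]
      · rw [if_neg (by simp [he])]
        rw [pvStepB_foldl_nil (cur.map (fun p => pvCoverA n d p cur)) v (L ++ R)]
        dsimp only
        rw [List.append_assoc, ih]
        simp only [List.flatMap_cons, List.any_append, he, Bool.false_or, List.foldl_append]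
        by_cases hL : (L.flatMap (fun cur => cur.map (fun p => pvCoverA n d p cur))).any
            (fun c => c.isEmpty) = true
        · simp [hL]
        · simp only [hL, Bool.false_eq_true, if_false]
          rw [pvStepB_foldl_nil (L.flatMap (fun cur => cur.map (fun p => pvCoverA n d p cur)))
                ((cur.map (fun p => pvCoverA n d p cur)).foldl pvStepB (v, [])).1
                ((cur.map (fun p => pvCoverA n d p cur)).foldl pvStepB (v, [])).2]
          simp [List.append_assoc]

-- an empty queue stays empty: A returns -1 over any remaining distances
theorem pvRoundsA_nil (n : Int) :
    ∀ (ds : List Int) (i : Nat) (v : PySem.Set (List Int)),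
      pvRoundsA n i ds [] v = -1 := by
  intro ds
  induction ds with
  | nil => intro i v; rfl
  | cons d ds ih => intro i v; rw [pvRoundsA]; simp [pvLevelA, ih]

-- the covered-everything test equals emptiness of the arc filter
theorem pvGone_eq (n d p : Int) (s : List Int) :
    pvGoneB n d p s = (pvCoverB n d p s).isEmpty := by
  unfold pvGoneB pvCoverB
  by_cases h : p < PySem.Int.mod (p + d) n
  · simp only [h, if_true]
    rcases hs : PySem.List.min? s (fun x => x) with _ | mn
    · rw [PySem.List.min?_eq_none_iff] at hs
      subst hs; rfl
    · rcases ht : PySem.List.max? s (fun x => x) with _ | mx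
      · rw [PySem.List.max?_eq_none_iff] at ht
        subst ht
        rw [(PySem.List.min?_eq_none_iff [] (fun x => x)).mpr rfl] at hs
        cases hs
      · rw [Bool.eq_iff_iff]
        simp only [List.isEmpty_iff, List.filter_eq_nil_iff, Bool.and_eq_true, decide_eq_true_eq]
        constructor
        · rintro ⟨h1, h2⟩ x hx
          have := PySem.List.min?_isMin hs x hx
          have := PySem.List.max?_isMax ht x hx
          simp only [Bool.or_eq_true, decide_eq_true_eq]
          omega
        · intro hall
          have h1 := hall mn (PySem.List.min?_mem hs)
          have h2 := hall mx (PySem.List.max?_mem ht)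
          simp only [Bool.or_eq_true, decide_eq_true_eq] at h1 h2
          omega
  · simp only [h, if_false]
    rw [Bool.eq_iff_iff]
    simp only [List.all_eq_true, List.isEmpty_iff, List.filter_eq_nil_iff,
      Bool.or_eq_true, Bool.and_eq_true, decide_eq_true_eq]
    constructor
    · intro hall x hx
      have := hall x hx
      omega
    · intro hall x hx
      have := hall x hx
      omega

-- the rounds of A equal B's recursive staged search
theorem pvRounds_eq (n : Int) :
    ∀ (ds : List Int) (i : Nat) (q : List (List Int)) (v : PySem.Set (List Int)),
      pvRoundsA n i ds q v = pvExpandB n ds i q v := by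
  intro ds
  induction ds with
  | nil => intro i q v; rfl
  | cons d ds ih =>
      intro i q v
      by_cases hq : q = []
      · subst hq
        rw [pvExpandB]
        simp only [List.isEmpty_nil, if_true]
        exact pvRoundsA_nil n (d :: ds) i v
      · have hqe : q.isEmpty = false := by simpa [List.isEmpty_iff] using hq
        rw [pvRoundsA, pvExpandB, hqe]
        have h := pvLevelA_spec n d q [] v
        rw [List.append_nil] at h
        have hk : q.flatMap (fun cur => cur.map (fun p => pvCoverA n d p cur)) =
            q.flatMap (fun cur => cur.map (fun p => pvCoverB n d p cur)) := by
          simp [pvCover_eq]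
        rw [hk] at h
        rw [h]
        have hany : (q.flatMap (fun cur => cur.map (fun p => pvCoverB n d p cur))).any
            (fun c => c.isEmpty) =
            q.any (fun s => s.any (fun p => pvGoneB n d p s)) := by
          simp only [List.any_flatMap, List.any_map, pvGone_eq]; rfl
        rw [← hany]
        by_cases he : (q.flatMap (fun cur => cur.map (fun p => pvCoverB n d p cur))).any
            (fun c => c.isEmpty) = true
        · simp [he]
        · simp only [he, Bool.false_eq_true, if_false]
          rw [pvFoldl_pvStepB_spec]
          simp only [List.nil_append]
          rw [ih, pvUnion_ofList]

-- ===== VERDICT (by name: the statement is the Claim_ definition above) =====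
theorem solution_spec : Claim_equal_solution := by
  intro n weak dist _dom _pre
  unfold Spec_solution solution solution_alt
  have hw : PySem.Set.add PySem.Set.empty weak = PySem.Set.ofList [weak] := rfl
  rw [hw]
  exact pvRounds_eq n (PySem.List.sorted dist (fun x => x) true) 0 [weak]
    (PySem.Set.ofList [weak])
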